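-- pv_equiv track=rewrite | github.com/TheAntoshkaBy/DSIP-Digital-Signal-and-Image-Processing- | Lab 4/transform.py | temp_ifwt
-- ===== SOURCE A (Python) =====
-- def temp_ifwt(wavelet_coefficients: list, decomposition_depth: int):
--     if len(wavelet_coefficients) == 1:
--         return wavelet_coefficients
--
--     detail = [x for x in wavelet_coefficients[int(len(wavelet_coefficients) / 2)::]]
--
--     approximation = temp_ifwt(detail, decomposition_depth - 1)
--
--     if decomposition_depth > 1:
--         return approximation
--
--     result = []
--     for i in range(int(len(wavelet_coefficients) / 2)):
--         result.append(approximation[i] + wavelet_coefficients[i])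
--         result.append(approximation[i] - wavelet_coefficients[i])
--
--     return result
-- ===== SOURCE B (Python) =====
-- def temp_ifwt(wavelet_coefficients: list, decomposition_depth: int):
--     # Iterative version: explicit descent with a stack, then bottom-up reconstruction.
--     stack = []
--     w, d = wavelet_coefficients, decomposition_depth
--     while len(w) != 1:
--         stack.append((w, d))
--         w = w[len(w) // 2:]
--         d -= 1
--     approximation = w
--     while stack:
--         w, d = stack.pop()
--         if d > 1:
--             continue
--         result = []
--         for i in range(len(w) // 2):
--             result.append(approximation[i] + w[i])
--             result.append(approximation[i] - w[i])
--         approximation = result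
--     return approximation
-- ===== Notes on version B (the rewrite author's own statement) =====
-- stated objective: alternative
-- what changed: Replaces the self-recursive reconstruction with two explicit loops: an iterative descent that pushes each (level, depth) pair onto a stack, then a stack-popping loop that rebuilds the approximation bottom-up.
import Mathlib
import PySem

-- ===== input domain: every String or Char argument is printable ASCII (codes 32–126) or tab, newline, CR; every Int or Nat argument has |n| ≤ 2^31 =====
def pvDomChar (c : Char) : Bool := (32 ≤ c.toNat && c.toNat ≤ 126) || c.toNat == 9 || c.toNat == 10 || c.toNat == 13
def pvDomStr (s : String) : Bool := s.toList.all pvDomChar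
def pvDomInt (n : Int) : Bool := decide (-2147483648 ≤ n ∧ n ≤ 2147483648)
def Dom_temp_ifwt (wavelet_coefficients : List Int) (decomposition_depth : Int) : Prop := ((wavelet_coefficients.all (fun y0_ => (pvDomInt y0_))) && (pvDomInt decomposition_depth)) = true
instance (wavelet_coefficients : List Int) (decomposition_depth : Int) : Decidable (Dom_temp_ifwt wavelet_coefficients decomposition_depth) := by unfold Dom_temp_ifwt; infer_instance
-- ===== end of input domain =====

-- B replaces A's self-recursion by an explicit descent stack plus a bottom-up
-- reconstruction loop (alternative decomposition, same asymptotic cost).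

-- ===== PORT A =====
-- Literal port of A. Python's w[len(w)//2:] is List.drop (PySem.List.slice_from_natCast);
-- the `w.length = 0` guard only makes the port total: Python recurses forever on [],
-- which Pre_ excludes. approximation[i]/w[i] with i from range(len//2) is nonnegative
-- indexing, ported as List.getD (Python raises IndexError out of range; Pre_ excludes that).
def temp_ifwt (wavelet_coefficients : List Int) (decomposition_depth : Int) : List Int :=
  if wavelet_coefficients.length = 1 then wavelet_coefficients
  else if wavelet_coefficients.length = 0 then wavelet_coefficients
  else
    let detail := wavelet_coefficients.drop (wavelet_coefficients.length / 2)
    let approximation := temp_ifwt detail (decomposition_depth - 1)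
    if 1 < decomposition_depth then approximation
    else
      (List.range (wavelet_coefficients.length / 2)).foldl
        (fun result i =>
          result ++ [approximation.getD i 0 + wavelet_coefficients.getD i 0,
                     approximation.getD i 0 - wavelet_coefficients.getD i 0]) []
termination_by wavelet_coefficients.length
decreasing_by simp [List.length_drop]; omega

-- ===== PORT B =====
-- first loop of Source B: push (w, d) while len(w) != 1 (same totality guard at length 0)
def tiDescend (w : List Int) (d : Int) (stack : List (List Int × Int)) :
    List (List Int × Int) × List Int :=
  if w.length = 1 then (stack, w)
  else if w.length = 0 then (stack, w)
  else tiDescend (w.drop (w.length / 2)) (d - 1) ((w, d) :: stack)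
termination_by w.length
decreasing_by simp [List.length_drop]; omega

-- body of Source B's second (stack-popping) loop
def tiCombine (approximation : List Int) (wd : List Int × Int) : List Int :=
  if 1 < wd.2 then approximation
  else
    (List.range (wd.1.length / 2)).foldl
      (fun result i =>
        result ++ [approximation.getD i 0 + wd.1.getD i 0,
                   approximation.getD i 0 - wd.1.getD i 0]) []

def temp_ifwt_alt (wavelet_coefficients : List Int) (decomposition_depth : Int) : List Int :=
  let sb := tiDescend wavelet_coefficients decomposition_depth []
  sb.1.foldl tiCombine sb.2

-- ===== PRECONDITION & SPEC =====
-- Pre_ is exactly where Python A returns: it excludes only inputs where A raises —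
-- the empty list (infinite recursion → RecursionError) and inputs where some level
-- that reconstructs (level j, of length ceil(n/2^j), reconstructs iff d ≤ j+1) has
-- length ≡ 2 (mod 4) and ≥ 6, where A's approximation is too short (IndexError).
def Pre_temp_ifwt (wavelet_coefficients : List Int) (decomposition_depth : Int) : Prop :=
  1 ≤ wavelet_coefficients.length ∧
  ∀ j < wavelet_coefficients.length,
    decomposition_depth ≤ (j : Int) + 1 →
      ¬ ((wavelet_coefficients.length + 2 ^ j - 1) / 2 ^ j % 4 = 2 ∧
         6 ≤ (wavelet_coefficients.length + 2 ^ j - 1) / 2 ^ j)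
instance (wavelet_coefficients : List Int) (decomposition_depth : Int) : Decidable (Pre_temp_ifwt wavelet_coefficients decomposition_depth) := by unfold Pre_temp_ifwt; infer_instance

def pvWitness_temp_ifwt : List Int × Int := ([1, 2, 3, 4], 1)

def Spec_temp_ifwt (wavelet_coefficients : List Int) (decomposition_depth : Int) (out : List Int) : Prop := out = temp_ifwt_alt wavelet_coefficients decomposition_depth
instance (wavelet_coefficients : List Int) (decomposition_depth : Int) (out : List Int) : Decidable (Spec_temp_ifwt wavelet_coefficients decomposition_depth out) := by unfold Spec_temp_ifwt; infer_instance

-- ===== CLAIM (what is proved, stated in full; the proofs are below) =====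
def Claim_equal_temp_ifwt : Prop := ∀ (wavelet_coefficients : List Int) (decomposition_depth : Int), Dom_temp_ifwt wavelet_coefficients decomposition_depth → Pre_temp_ifwt wavelet_coefficients decomposition_depth → Spec_temp_ifwt wavelet_coefficients decomposition_depth (temp_ifwt wavelet_coefficients decomposition_depth)

-- ===== LEMMAS AND PROOFS =====

-- Loop invariant of Source B's two loops: folding tiCombine over the stack produced by
-- the descent from (w, d, s) equals folding it over s starting from A's result on (w, d).
theorem tiDescend_foldl (w : List Int) (d : Int) (s : List (List Int × Int)) :
    (tiDescend w d s).1.foldl tiCombine (tiDescend w d s).2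
      = s.foldl tiCombine (temp_ifwt w d) := by
  fun_induction tiDescend w d s with
  | case1 w d s h1 =>
      simp [temp_ifwt, h1]
  | case2 w d s h1 h0 =>
      simp [temp_ifwt, h0]
  | case3 w d s h1 h0 ih =>
      rw [ih, List.foldl_cons]
      congr 1
      conv_rhs => rw [temp_ifwt]
      simp only [h1, h0, if_false, tiCombine]

-- ===== VERDICT (by name: the statement is the Claim_ definition above) =====
theorem temp_ifwt_spec : Claim_equal_temp_ifwt := by
  intro w d _ _
  unfold Spec_temp_ifwt temp_ifwt_alt
  rw [tiDescend_foldl]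
  rfl
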